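-- pv_equiv track=rewrite | github.com/BlueJacket98/CodeSignal | concatEdgeLetters.py | concatEdgeLetters
-- ===== SOURCE A (Python) =====
-- def concatEdgeLetters(a):
--     res = ["" for _ in range(len(a))]
--     for i in range(len(a)):
--         if i == len(a) - 1:
--             res[i] = a[i][0] + a[0][-1]
--         else:
--             res[i] = a[i][0] + a[i+1][-1]
--     return res
-- ===== SOURCE B (Python) =====
-- def concatEdgeLetters(a):
--     if not a:
--         return []
--     out = [a[-1][0] + a[0][-1]]
--     succ = a[-1]
--     for w in reversed(a[:-1]):
--         out.append(w[0] + succ[-1])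
--         succ = w
--     out.reverse()
--     return out
-- ===== Notes on version B (the rewrite author's own statement) =====
-- stated objective: alternative
-- what changed: Replaces A's preallocated result list and index loop with an in-loop wrap-around branch by a back-to-front construction: B emits the wrap element first, then walks the reversed prefix with a (result, successor-word) accumulator and reverses at the end, using no indices at all.
-- outside the precondition, e.g. on concatEdgeLetters(['ab', '']): A raises IndexError, B raises IndexError
import Mathlib
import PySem

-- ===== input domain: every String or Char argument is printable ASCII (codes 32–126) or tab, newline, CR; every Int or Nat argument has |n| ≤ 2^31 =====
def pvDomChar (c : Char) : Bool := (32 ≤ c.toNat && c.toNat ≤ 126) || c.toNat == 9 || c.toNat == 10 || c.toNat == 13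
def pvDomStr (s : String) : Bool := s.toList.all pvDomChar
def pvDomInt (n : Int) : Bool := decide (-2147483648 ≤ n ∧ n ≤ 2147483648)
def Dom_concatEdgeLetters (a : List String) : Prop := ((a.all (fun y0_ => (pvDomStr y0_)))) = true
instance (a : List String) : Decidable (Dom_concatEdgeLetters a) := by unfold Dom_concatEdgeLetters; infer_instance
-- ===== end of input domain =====

-- B builds the result back-to-front with an accumulator over the reversed prefix (wrap element first,
-- reverse at the end) instead of A's preallocated list and index loop with a wrap branch; same O(n) cost.

-- shared helper: Python's `w[0] + s[-1]` (both sources contain this expression verbatim);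
-- "" stands for the IndexError case, which Pre_ excludes
def pvFirstLast (w s : String) : String :=
  match PySem.Str.pyGet? w 0, PySem.Str.pyGet? s (-1) with
  | some c, some d => String.ofList [c, d]
  | _, _ => ""

-- ===== PORT A =====
def concatEdgeLetters (a : List String) : List String :=
  let n : Int := a.length
  let res := (PySem.List.pyRange 0 n 1).map (fun _ => "")
  (PySem.List.pyRange 0 n 1).foldl
    (fun res i =>
      if i = n - 1 then
        res.set i.toNat (pvFirstLast (PySem.List.pyGetD a i "") (PySem.List.pyGetD a 0 ""))
      else
        res.set i.toNat (pvFirstLast (PySem.List.pyGetD a i "") (PySem.List.pyGetD a (i + 1) "")))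
    res

-- ===== PORT B =====
def concatEdgeLetters_alt (a : List String) : List String :=
  if a = [] then []
  else
    let succ0 := PySem.List.pyGetD a (-1) ""
    let out0 : List String := [pvFirstLast succ0 (PySem.List.pyGetD a 0 "")]
    let st := ((PySem.List.slice a none (some (-1))).reverse).foldl
      (fun (st : List String × String) w => (st.1 ++ [pvFirstLast w st.2], w)) (out0, succ0)
    st.1.reverse

-- ===== PRECONDITION & SPEC =====
-- Pre_ excludes lists containing an empty string, on which Python A raises IndexError (w[0]/w[-1]).
def Pre_concatEdgeLetters (a : List String) : Prop := ∀ s ∈ a, s ≠ ""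
instance (a : List String) : Decidable (Pre_concatEdgeLetters a) := by unfold Pre_concatEdgeLetters; infer_instance
def pvWitness_concatEdgeLetters : List String := ["ab", "cd", "e"]

def Spec_concatEdgeLetters (a : List String) (out : List String) : Prop := out = concatEdgeLetters_alt a
instance (a : List String) (out : List String) : Decidable (Spec_concatEdgeLetters a out) := by unfold Spec_concatEdgeLetters; infer_instance

-- ===== CLAIM (what is proved, stated in full; the proofs are below) =====
def Claim_equal_concatEdgeLetters : Prop := ∀ (a : List String), Dom_concatEdgeLetters a → Pre_concatEdgeLetters a → Spec_concatEdgeLetters a (concatEdgeLetters a)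

-- ===== LEMMAS AND PROOFS =====

-- writing each res[i] of an init list of the right length, in order, is a map over range
lemma foldl_pyRange_set {α : Type} (init : List α) (g : Int → α) (k : Nat) (hk : k ≤ init.length) :
    (PySem.List.pyRange 0 (k : Int) 1).foldl (fun r i => r.set i.toNat (g i)) init
      = (List.range k).map (fun j : Nat => g j) ++ init.drop k := by
  induction k with
  | zero => simp [PySem.List.pyRange_one_eq_nil]
  | succ k ih =>
    have hk' : k ≤ init.length := Nat.le_of_succ_le hk
    have hsplit : PySem.List.pyRange 0 ((k + 1 : Nat) : Int) 1
        = PySem.List.pyRange 0 (k : Int) 1 ++ [(k : Int)] := by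
      push_cast
      exact PySem.List.pyRange_one_succ_right (by positivity)
    rw [hsplit, List.foldl_append, ih hk']
    have hdrop : init.drop k = init[k] :: init.drop (k + 1) :=
      List.drop_eq_getElem_cons hk
    simp only [List.foldl_cons, List.foldl_nil, hdrop, Int.toNat_natCast]
    simp [List.range_succ]
    rw [hdrop, List.set_cons_zero]

-- B's back-to-front accumulator fold, characterised: fold over xs.reverse appends the
-- successor-chain pairs of xs (reversed) to the accumulator and ends with xs's head as successor
lemma foldl_rev_acc (xs : List String) (s : String) (acc : List String) :
    (xs.reverse).foldl (fun (st : List String × String) w => (st.1 ++ [pvFirstLast w st.2], w)) (acc, s)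
      = (acc ++ (List.zipWith pvFirstLast xs (xs.tail ++ [s])).reverse, xs.headD s) := by
  induction xs generalizing acc with
  | nil => simp
  | cons x xs ih =>
    have hz : List.zipWith pvFirstLast (x :: xs) (xs ++ [s])
        = pvFirstLast x (xs.headD s) :: List.zipWith pvFirstLast xs (xs.tail ++ [s]) := by
      cases xs <;> simp
    rw [List.reverse_cons, List.foldl_append, ih]
    simp [hz]

theorem concatEdgeLetters_spec : Claim_equal_concatEdgeLetters := by
  intro a _ hpre
  unfold Spec_concatEdgeLetters concatEdgeLetters concatEdgeLetters_alt
  simp only []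
  by_cases hnil : a = []
  · subst hnil; simp [PySem.List.pyRange_one_eq_nil]
  rw [if_neg hnil]
  set n := a.length with hn
  have hnpos : 0 < n := List.length_pos_iff.mpr hnil
  -- A's side: the foldl is a map over range n
  have hfun : (fun (r : List String) (i : Int) =>
      if i = (n : Int) - 1 then
        r.set i.toNat (pvFirstLast (PySem.List.pyGetD a i "") (PySem.List.pyGetD a 0 ""))
      else
        r.set i.toNat (pvFirstLast (PySem.List.pyGetD a i "") (PySem.List.pyGetD a (i + 1) "")))
      = (fun (r : List String) (i : Int) => r.set i.toNat
          (if i = (n : Int) - 1 then pvFirstLast (PySem.List.pyGetD a i "") (PySem.List.pyGetD a 0 "")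
           else pvFirstLast (PySem.List.pyGetD a i "") (PySem.List.pyGetD a (i + 1) ""))) := by
    funext r i; split <;> rfl
  rw [hfun,
    foldl_pyRange_set ((PySem.List.pyRange 0 (n : Int) 1).map (fun _ => ""))
      _ n (by simp [PySem.List.length_pyRange_one]),
    List.drop_eq_nil_of_le (by simp [PySem.List.length_pyRange_one]), List.append_nil]
  -- B's side: unfold the accumulator fold
  rw [PySem.List.slice_to_neg_one, foldl_rev_acc, PySem.List.pyGetD_neg_one a "" hnil]
  simp only [List.reverse_append, List.reverse_reverse, List.reverse_singleton]
  -- now both sides are explicit lists; compare elementwise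
  have hdl : a.dropLast.length = n - 1 := by simp [hn]
  have hzl : (List.zipWith pvFirstLast a.dropLast (a.dropLast.tail ++ [a.getLast hnil])).length
      = n - 1 := by
    rcases a with _ | ⟨x, xs⟩
    · exact absurd rfl hnil
    · rcases xs with _ | ⟨y, ys⟩ <;> simp_all
  apply List.ext_getElem
  · simp [hzl]; omega
  · intro i h1 h2
    have hi : i < n := by simpa using h1
    simp only [List.getElem_map, List.getElem_range]
    have hga : PySem.List.pyGetD a (i : Int) "" = a[i] := by
      rw [PySem.List.pyGetD_natCast]; exact List.getD_eq_getElem a "" hi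
    have hga0 : PySem.List.pyGetD a (0 : Int) "" = a[0] := by
      rw [PySem.List.pyGetD_zero]; exact List.getD_eq_getElem a "" hnpos
    have hlastEq : a.getLast hnil = a[n - 1]'(by omega) := List.getLast_eq_getElem hnil
    by_cases hlast : (i : Int) = (n : Int) - 1
    · have hieq : i = n - 1 := by omega
      rw [if_pos hlast, List.getElem_append_right (by rw [hzl]; omega)]
      simp [hieq, hlastEq]
      rw [List.getElem?_eq_getElem (by omega)]
      rfl
    · have hilt : i < n - 1 := by omega
      have hga1 : PySem.List.pyGetD a ((i : Int) + 1) "" = a[i + 1]'(by omega) := by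
        have : ((i : Int) + 1) = ((i + 1 : Nat) : Int) := by push_cast; ring
        rw [this, PySem.List.pyGetD_natCast]
        exact List.getD_eq_getElem a "" (by omega)
      rw [if_neg hlast, hga, hga1,
        List.getElem_append_left (by rw [hzl]; omega)]
      rw [List.getElem_zipWith]
      have htl : a.dropLast.tail.length = n - 2 := by simp [hdl]; omega
      congr 1
      · simp
      · by_cases h2' : i < n - 2
        · rw [List.getElem_append_left (by rw [htl]; omega)]
          simp [List.getElem_tail]
        · have hieq2 : i = n - 2 := by omega
          rw [List.getElem_append_right (by rw [htl]; omega)]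
          simp [htl, hieq2, hlastEq]
          congr 1
          omega
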